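-- pv_equiv track=rewrite | github.com/981377660LMT/algorithm-study | 13_回溯算法/itertools/more-itertools/combinatorics.py | nth_combination
-- ===== SOURCE A (Python) =====
-- from typing import Any, Iterable, Optional, Sequence, TypeVar
--
-- T = TypeVar("T")
--
-- def nth_combination(iterable: Iterable[T], r: int, index: int):
--     """Equivalent to ``list(combinations(iterable, r))[index]``.
--
--     The subsequences of *iterable* that are of length *r* can be ordered
--     lexicographically. :func:`nth_combination` computes the subsequence at
--     sort position *index* directly, without computing the previous
--     subsequences.
--
--         >>> nth_combination(range(5), 3, 5)
--         (0, 3, 4)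
--
--     ``ValueError`` will be raised If *r* is negative or greater than the length
--     of *iterable*.
--     ``IndexError`` will be raised if the given *index* is invalid.
--     """
--     pool = tuple(iterable)
--     n = len(pool)
--     if (r < 0) or (r > n):
--         raise ValueError
--
--     c = 1
--     k = min(r, n - r)
--     for i in range(1, k + 1):
--         c = c * (n - k + i) // i
--
--     if index < 0:
--         index += c
--
--     if (index < 0) or (index >= c):
--         raise IndexError
--
--     result = []
--     while r:
--         c, n, r = c * r // n, n - 1, r - 1
--         while index >= c:
--             index -= c
--             c, n = c * (n - r) // n, n - 1
--         result.append(pool[-1 - n])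
--
--     return tuple(result)
-- ===== SOURCE B (Python) =====
-- def _comb(n, k):
--     """Binomial coefficient C(n, k); 0 when k < 0 or k > n."""
--     if k < 0 or k > n:
--         return 0
--     k = min(k, n - k)
--     c = 1
--     for i in range(1, k + 1):
--         c = c * (n - k + i) // i
--     return c
--
--
-- def nth_combination(iterable, r, index):
--     """Unrank: pick elements position by position, computing each binomial
--     count afresh instead of updating it incrementally."""
--     pool = tuple(iterable)
--     n = len(pool)
--     if r < 0 or r > n:
--         raise ValueError
--     c = _comb(n, r)
--     if index < 0:
--         index += c
--     if index < 0 or index >= c: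
--         raise IndexError
--     result = []
--     j = 0
--     rem = r
--     while rem:
--         cnt = _comb(n - j - 1, rem - 1)
--         if index < cnt:
--             result.append(pool[j])
--             rem -= 1
--         else:
--             index -= cnt
--         j += 1
--     return tuple(result)
-- ===== Notes on version B (the rewrite author's own statement) =====
-- stated objective: alternative
-- what changed: B unranks by scanning pool positions left-to-right, recomputing each binomial count C(n-j-1, rem-1) afresh with an explicit comb helper and positive indexing, instead of A's incremental multiplicative update of c/n with an inner skip-while and negative indexing from the end; same ValueError/IndexError behaviour.
import Mathlib
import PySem

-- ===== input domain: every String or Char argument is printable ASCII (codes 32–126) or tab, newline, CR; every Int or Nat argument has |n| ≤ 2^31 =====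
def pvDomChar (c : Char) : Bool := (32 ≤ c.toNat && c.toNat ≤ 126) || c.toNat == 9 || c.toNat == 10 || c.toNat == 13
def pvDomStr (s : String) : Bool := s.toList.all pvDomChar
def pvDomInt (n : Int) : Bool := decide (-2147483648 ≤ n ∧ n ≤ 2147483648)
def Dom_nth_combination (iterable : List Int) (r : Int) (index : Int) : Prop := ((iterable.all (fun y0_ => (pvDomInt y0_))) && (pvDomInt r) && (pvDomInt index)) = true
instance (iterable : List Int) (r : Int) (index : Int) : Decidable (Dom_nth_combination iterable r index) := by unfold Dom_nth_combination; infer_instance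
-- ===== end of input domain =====

-- B replaces A's incremental c/n update (with its inner skip-while and negative indexing from
-- the end) by a left-to-right scan over pool positions recomputing each binomial count afresh;
-- alternative decomposition, not faster.  A raises ValueError/IndexError on invalid r/index:
-- those inputs are outside Pre_ (the ports return [] there).

-- shared: the multiplicative binomial loop `for i in range(1, k+1): c = c * (n-k+i) // i`
-- (this exact loop appears verbatim in A's body and inside B's helper _comb)
def pvCombLoop (n k : Int) : Int :=
  (PySem.List.pyRange 1 (k + 1) 1).foldl
    (fun c i => PySem.Int.floordiv (c * (n - k + i)) i) 1

-- ===== PORT A =====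
-- inner `while index >= c` loop; fuel guard only makes the recursion total (n decreases each pass)
def pvInnerA : Nat → Int → Int → Int → Int → Int × Int × Int
  | 0, c, n, index, _r => (c, n, index)
  | fuel+1, c, n, index, r =>
    if index ≥ c then
      pvInnerA fuel (PySem.Int.floordiv (c * (n - r)) n) (n - 1) (index - c) r
    else (c, n, index)

-- outer `while r` loop; fuel = r (r decreases by one each iteration)
def pvOuterA (pool : List Int) : Nat → Int → Int → Int → Int → List Int → List Int
  | 0, _c, _n, _r, _index, acc => acc.reverse
  | fuel+1, c, n, r, index, acc =>
    if r ≠ 0 then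
      let c1 := PySem.Int.floordiv (c * r) n
      let n1 := n - 1
      let r1 := r - 1
      let s := pvInnerA (n1.toNat + 1) c1 n1 index r1
      pvOuterA pool fuel s.1 s.2.1 r1 s.2.2 ((PySem.List.pyGetD pool (-1 - s.2.1) 0) :: acc)
    else acc.reverse

def nth_combination (iterable : List Int) (r : Int) (index : Int) : List Int :=
  let pool := iterable
  let n : Int := PySem.List.len pool
  if r < 0 ∨ r > n then []  -- Python: raise ValueError (outside Pre_)
  else
    let k := min r (n - r)
    let c := pvCombLoop n k
    let index1 := if index < 0 then index + c else index
    if index1 < 0 ∨ index1 ≥ c then []  -- Python: raise IndexError (outside Pre_)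
    else pvOuterA pool r.toNat c n r index1 []

-- ===== PORT B =====
-- helper _comb(n, k)
def pvComb (n k : Int) : Int :=
  if k < 0 ∨ k > n then 0
  else
    pvCombLoop n (min k (n - k))

-- `while rem` scan over pool positions j; fuel = len(pool) (the loop runs at most n times)
def pvScanB (pool : List Int) (n : Int) : Nat → Int → Int → Int → List Int → List Int
  | 0, _j, _rem, _index, acc => acc.reverse
  | fuel+1, j, rem, index, acc =>
    if rem ≠ 0 then
      let cnt := pvComb (n - j - 1) (rem - 1)
      if index < cnt then
        pvScanB pool n fuel (j + 1) (rem - 1) index ((PySem.List.pyGetD pool j 0) :: acc)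
      else
        pvScanB pool n fuel (j + 1) rem (index - cnt) acc
    else acc.reverse

def nth_combination_alt (iterable : List Int) (r : Int) (index : Int) : List Int :=
  let pool := iterable
  let n : Int := PySem.List.len pool
  if r < 0 ∨ r > n then []  -- Python: raise ValueError (outside Pre_)
  else
    let c := pvComb n r
    let index1 := if index < 0 then index + c else index
    if index1 < 0 ∨ index1 ≥ c then []  -- Python: raise IndexError (outside Pre_)
    else pvScanB pool n pool.length 0 r index1 []

-- ===== PRECONDITION & SPEC =====
-- Pre_ holds exactly where Python A returns: 0 ≤ r ≤ len and index within ±C(len, r)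
def Pre_nth_combination (iterable : List Int) (r : Int) (index : Int) : Prop :=
  0 ≤ r ∧ r ≤ iterable.length ∧
  -(iterable.length.choose r.toNat : Int) ≤ index ∧ index < (iterable.length.choose r.toNat : Int)
instance (iterable : List Int) (r : Int) (index : Int) : Decidable (Pre_nth_combination iterable r index) := by unfold Pre_nth_combination; infer_instance

def pvWitness_nth_combination : List Int × Int × Int := ([0, 1, 2, 3, 4], 3, 5)

def Spec_nth_combination (iterable : List Int) (r : Int) (index : Int) (out : List Int) : Prop := out = nth_combination_alt iterable r index
instance (iterable : List Int) (r : Int) (index : Int) (out : List Int) : Decidable (Spec_nth_combination iterable r index out) := by unfold Spec_nth_combination; infer_instance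

-- ===== CLAIM (what is proved, stated in full; the proofs are below) =====
def Claim_equal_nth_combination : Prop := ∀ (iterable : List Int) (r : Int) (index : Int), Dom_nth_combination iterable r index → Pre_nth_combination iterable r index → Spec_nth_combination iterable r index (nth_combination iterable r index)

-- ===== LEMMAS AND PROOFS =====

-- the multiplicative loop computes the binomial coefficient
lemma pv_fold_aux (n k : Nat) (hk : k ≤ n) : ∀ j, j ≤ k →
    (PySem.List.pyRange 1 ((j : Int) + 1) 1).foldl
      (fun c i => PySem.Int.floordiv (c * ((n : Int) - (k : Int) + i)) i) 1
      = ((n - k + j).choose j : Int) := by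
  intro j
  induction j with
  | zero =>
    intro _
    rw [PySem.List.pyRange_one_eq_nil (by norm_num)]
    simp
  | succ j ih =>
    intro hj
    rw [show (((j+1 : Nat) : Int) + 1) = ((j : Int) + 1) + 1 by push_cast [Nat.cast_add]; ring,
        PySem.List.pyRange_one_succ_right (by omega), List.foldl_append,
        ih (by omega)]
    simp only [List.foldl]
    have hc1 : ((n : Int) - (k : Int) + ((j : Int) + 1)) = ((n - k + j + 1 : Nat) : Int) := by
      omega
    rw [hc1,
        show (((n - k + j).choose j : Int) * ((n - k + j + 1 : Nat) : Int))
           = (((n - k + j).choose j * (n - k + j + 1) : Nat) : Int) by push_cast; ring,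
        show ((j : Int) + 1) = ((j + 1 : Nat) : Int) by push_cast; ring,
        PySem.Int.floordiv_natCast]
    norm_cast
    rw [Nat.mul_comm, Nat.add_one_mul_choose_eq, Nat.mul_div_cancel _ (Nat.succ_pos j),
        Nat.add_assoc]

lemma pv_combLoop_choose (n k : Nat) (hk : k ≤ n) :
    pvCombLoop (n : Int) (k : Int) = (n.choose k : Int) := by
  unfold pvCombLoop
  rw [pv_fold_aux n k hk k le_rfl, Nat.sub_add_cancel hk]

lemma pv_comb_eq (μ ρ : Nat) : pvComb (μ : Int) (ρ : Int) = (μ.choose ρ : Int) := by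
  unfold pvComb
  by_cases h : ρ ≤ μ
  · rw [if_neg (by omega)]
    have hmin : min (ρ : Int) ((μ : Int) - (ρ : Int)) = ((min ρ (μ - ρ) : Nat) : Int) := by
      omega
    rw [hmin, pv_combLoop_choose μ (min ρ (μ - ρ)) (by omega)]
    rcases Nat.le_total ρ (μ - ρ) with hle | hle
    · rw [Nat.min_eq_left hle]
    · rw [Nat.min_eq_right hle, Nat.choose_symm h]
  · rw [if_pos (by omega), Nat.choose_eq_zero_of_lt (by omega)]
    simp

-- `c * r // n` step: C(ν+1, ρ+1) * (ρ+1) // (ν+1) = C(ν, ρ)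
lemma pv_c1_eq (ν ρ : Nat) :
    PySem.Int.floordiv (((ν + 1).choose (ρ + 1) : Int) * ((ρ : Int) + 1)) ((ν : Int) + 1)
      = (ν.choose ρ : Int) := by
  have key : (ν + 1).choose (ρ + 1) * (ρ + 1) = (ν + 1) * ν.choose ρ :=
    (Nat.add_one_mul_choose_eq ν ρ).symm
  rw [show (((ν + 1).choose (ρ + 1) : Int) * ((ρ : Int) + 1))
        = (((ν + 1).choose (ρ + 1) * (ρ + 1) : Nat) : Int) by push_cast; ring,
      show ((ν : Int) + 1) = ((ν + 1 : Nat) : Int) by push_cast; ring,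
      PySem.Int.floordiv_natCast, key, Nat.mul_div_cancel_left _ (Nat.succ_pos ν)]

-- `c * (n - r) // n` step: C(ν+1, ρ) * (ν+1-ρ) // (ν+1) = C(ν, ρ)
lemma pv_c2_eq (ν ρ : Nat) (h : ρ ≤ ν + 1) :
    PySem.Int.floordiv (((ν + 1).choose ρ : Int) * (((ν : Int) + 1) - (ρ : Int))) ((ν : Int) + 1)
      = (ν.choose ρ : Int) := by
  have key : (ν + 1).choose ρ * (ν + 1 - ρ) = (ν + 1) * ν.choose ρ := by
    rw [← Nat.choose_mul_succ_eq ν ρ, Nat.mul_comm]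
  rw [show (((ν + 1).choose ρ : Int) * (((ν : Int) + 1) - (ρ : Int)))
        = (((ν + 1).choose ρ * (ν + 1 - ρ) : Nat) : Int) by
        have : ((ν + 1 - ρ : Nat) : Int) = ((ν : Int) + 1) - (ρ : Int) := by omega
        rw [← this]; push_cast; ring,
      show ((ν : Int) + 1) = ((ν + 1 : Nat) : Int) by push_cast; ring,
      PySem.Int.floordiv_natCast, key, Nat.mul_div_cancel_left _ (Nat.succ_pos ν)]

-- a nonnegative index below C(m, ρ) forces ρ ≤ m
lemma pv_choose_le (m ρ : Nat) (index : Int) (h0 : 0 ≤ index)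
    (hlt : index < (m.choose ρ : Int)) : ρ ≤ m := by
  by_contra h
  rw [Nat.choose_eq_zero_of_lt (by omega)] at hlt
  simp at hlt
  omega

-- one-step unfoldings of the three loops (definitional)
lemma pvInnerA_succ (fuel : Nat) (c n index r : Int) :
    pvInnerA (fuel + 1) c n index r
      = if index ≥ c then pvInnerA fuel (PySem.Int.floordiv (c * (n - r)) n) (n - 1) (index - c) r
        else (c, n, index) := rfl

lemma pvScanB_succ (pool : List Int) (n : Int) (fuel : Nat) (j rem index : Int) (acc : List Int) :
    pvScanB pool n (fuel + 1) j rem index acc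
      = if rem ≠ 0 then
          if index < pvComb (n - j - 1) (rem - 1) then
            pvScanB pool n fuel (j + 1) (rem - 1) index ((PySem.List.pyGetD pool j 0) :: acc)
          else pvScanB pool n fuel (j + 1) rem (index - pvComb (n - j - 1) (rem - 1)) acc
        else acc.reverse := rfl

lemma pvOuterA_succ (pool : List Int) (fuel : Nat) (c n r index : Int) (acc : List Int) :
    pvOuterA pool (fuel + 1) c n r index acc
      = if r ≠ 0 then
          pvOuterA pool fuel
            (pvInnerA ((n - 1).toNat + 1) (PySem.Int.floordiv (c * r) n) (n - 1) index (r - 1)).1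
            (pvInnerA ((n - 1).toNat + 1) (PySem.Int.floordiv (c * r) n) (n - 1) index (r - 1)).2.1
            (r - 1)
            (pvInnerA ((n - 1).toNat + 1) (PySem.Int.floordiv (c * r) n) (n - 1) index (r - 1)).2.2
            ((PySem.List.pyGetD pool
              (-1 - (pvInnerA ((n - 1).toNat + 1) (PySem.Int.floordiv (c * r) n) (n - 1) index
                (r - 1)).2.1) 0) :: acc)
        else acc.reverse := rfl

-- the pick step: A appends pool[-1-μ], B appends pool[len-1-μ]; both continue with m = μ
lemma pv_pick_case (pool : List Int) (ρ μ : Nat)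
    (hmain : ∀ (m : Nat) (index : Int) (acc : List Int) (fb : Nat),
      m ≤ pool.length → m ≤ fb → 0 ≤ index → index < (m.choose ρ : Int) →
      pvOuterA pool ρ (m.choose ρ : Int) (m : Int) (ρ : Int) index acc
        = pvScanB pool (pool.length : Int) fb ((pool.length - m : Nat) : Int) (ρ : Int) index acc)
    (index : Int) (acc : List Int) (fb' : Nat)
    (hμL : μ < pool.length) (hfb : μ ≤ fb') (h0 : 0 ≤ index)
    (hpick : index < (μ.choose ρ : Int)) :
    pvOuterA pool ρ (μ.choose ρ : Int) (μ : Int) (ρ : Int) index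
        ((PySem.List.pyGetD pool (-1 - (μ : Int)) 0) :: acc)
      = pvScanB pool (pool.length : Int) (fb' + 1) ((pool.length - 1 - μ : Nat) : Int)
          ((ρ : Int) + 1) index acc := by
  rw [pvScanB_succ]
  rw [if_pos (by omega : ((ρ : Int) + 1) ≠ 0),
      show ((ρ : Int) + 1 - 1) = (ρ : Int) by ring,
      show ((pool.length : Int) - ((pool.length - 1 - μ : Nat) : Int) - 1) = ((μ : Nat) : Int) by
        omega,
      pv_comb_eq μ ρ, if_pos hpick,
      show ((pool.length - 1 - μ : Nat) : Int) + 1 = ((pool.length - μ : Nat) : Int) by omega]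
  have helem : PySem.List.pyGetD pool ((pool.length - 1 - μ : Nat) : Int) 0
      = PySem.List.pyGetD pool (-1 - (μ : Int)) 0 := by
    rw [show (-1 - (μ : Int)) = -(((μ + 1 : Nat) : Int)) by push_cast; ring,
        PySem.List.pyGetD_neg_natCast _ _ _ (by omega) (by omega),
        PySem.List.pyGetD_natCast, List.getD_eq_getElem _ _ (by omega)]
    congr 1
    omega
  rw [helem]
  exact hmain μ index _ fb' (by omega) hfb h0 hpick

-- inner bisimulation: A's skip-while (state c = C(μ, ρ), n = μ) vs B's scan at position len-1-μ
lemma pv_inner_loop (pool : List Int) (ρ : Nat)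
    (hmain : ∀ (m : Nat) (index : Int) (acc : List Int) (fb : Nat),
      m ≤ pool.length → m ≤ fb → 0 ≤ index → index < (m.choose ρ : Int) →
      pvOuterA pool ρ (m.choose ρ : Int) (m : Int) (ρ : Int) index acc
        = pvScanB pool (pool.length : Int) fb ((pool.length - m : Nat) : Int) (ρ : Int) index acc) :
    ∀ (μ : Nat) (index : Int) (acc : List Int) (fb : Nat),
      μ < pool.length → μ + 1 ≤ fb → 0 ≤ index →
      index < (μ.choose ρ : Int) + (μ.choose (ρ + 1) : Int) →
      pvOuterA pool ρ (pvInnerA (μ + 1) (μ.choose ρ : Int) (μ : Int) index (ρ : Int)).1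
          (pvInnerA (μ + 1) (μ.choose ρ : Int) (μ : Int) index (ρ : Int)).2.1 (ρ : Int)
          (pvInnerA (μ + 1) (μ.choose ρ : Int) (μ : Int) index (ρ : Int)).2.2
          ((PySem.List.pyGetD pool
              (-1 - (pvInnerA (μ + 1) (μ.choose ρ : Int) (μ : Int) index (ρ : Int)).2.1) 0) :: acc)
        = pvScanB pool (pool.length : Int) fb ((pool.length - 1 - μ : Nat) : Int)
            ((ρ : Int) + 1) index acc := by
  intro μ
  induction μ with
  | zero =>
    intro index acc fb hμL hfb h0 hlt
    obtain ⟨fb', rfl⟩ : ∃ fb', fb = fb' + 1 := ⟨fb - 1, by omega⟩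
    have hpick : index < ((0 : Nat).choose ρ : Int) := by
      rw [Nat.choose_eq_zero_of_lt (by omega : (0:Nat) < ρ + 1)] at hlt
      simpa using hlt
    rw [pvInnerA_succ, if_neg (by omega)]
    exact pv_pick_case pool ρ 0 hmain index acc fb' hμL (by omega) h0 hpick
  | succ ν ih =>
    intro index acc fb hμL hfb h0 hlt
    obtain ⟨fb', rfl⟩ : ∃ fb', fb = fb' + 1 := ⟨fb - 1, by omega⟩
    by_cases hpick : index < ((ν + 1).choose ρ : Int)
    · rw [pvInnerA_succ, if_neg (by omega)]
      exact pv_pick_case pool ρ (ν + 1) hmain index acc fb' hμL (by omega) h0 hpick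
    · -- skip step
      have hρμ : ρ + 1 ≤ ν + 1 :=
        pv_choose_le (ν + 1) (ρ + 1) (index - ((ν + 1).choose ρ : Int)) (by omega)
          (by have h1 : ((ν + 1).choose (ρ + 1) : Int) ≤ ((ν + 1).choose (ρ + 1) : Int) := le_rfl
              omega)
      have hpascal : ((ν + 1).choose (ρ + 1) : Int)
          = (ν.choose ρ : Int) + (ν.choose (ρ + 1) : Int) := by
        exact_mod_cast congrArg (Nat.cast : Nat → Int) (Nat.choose_succ_succ' ν ρ)
      -- A: one pass of the inner while
      rw [pvInnerA_succ, if_pos (by omega),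
          show (((ν + 1 : Nat) : Int)) = ((ν : Int) + 1) by push_cast; ring,
          pv_c2_eq ν ρ (by omega),
          show ((ν : Int) + 1 - 1) = (ν : Int) by ring]
      -- B: one skipping scan step
      rw [pvScanB_succ,
          if_pos (by omega : ((ρ : Int) + 1) ≠ 0),
          show ((ρ : Int) + 1 - 1) = (ρ : Int) by ring,
          show ((pool.length : Int) - ((pool.length - 1 - (ν + 1) : Nat) : Int) - 1)
              = ((ν + 1 : Nat) : Int) by omega,
          pv_comb_eq (ν + 1) ρ, if_neg (by omega),
          show ((pool.length - 1 - (ν + 1) : Nat) : Int) + 1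
              = ((pool.length - 1 - ν : Nat) : Int) by omega]
      exact ih (index - ((ν + 1).choose ρ : Int)) acc fb' (by omega) (by omega) (by omega)
        (by omega)

-- main bisimulation: A's outer loop vs B's scan, state c = C(m, ρ), n = m, j = len - m
lemma pv_main_loop : ∀ (ρ m : Nat) (pool : List Int) (index : Int) (acc : List Int) (fb : Nat),
    m ≤ pool.length → m ≤ fb → 0 ≤ index → index < (m.choose ρ : Int) →
    pvOuterA pool ρ (m.choose ρ : Int) (m : Int) (ρ : Int) index acc
      = pvScanB pool (pool.length : Int) fb ((pool.length - m : Nat) : Int) (ρ : Int) index acc := by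
  intro ρ
  induction ρ with
  | zero =>
    intro m pool index acc fb hm hfb h0 hlt
    cases fb with
    | zero => rfl
    | succ fb => rw [pvScanB_succ, if_neg (by simp)]; rfl
  | succ ρ ih =>
    intro m pool index acc fb hm hfb h0 hlt
    have hρm : ρ + 1 ≤ m := pv_choose_le m (ρ + 1) index h0 hlt
    obtain ⟨ν, rfl⟩ : ∃ ν, m = ν + 1 := ⟨m - 1, by omega⟩
    have hpascal : ((ν + 1).choose (ρ + 1) : Int)
        = (ν.choose ρ : Int) + (ν.choose (ρ + 1) : Int) := by
      exact_mod_cast congrArg (Nat.cast : Nat → Int) (Nat.choose_succ_succ' ν ρ)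
    rw [pvOuterA_succ, if_pos (by push_cast; omega),
        show (((ρ + 1 : Nat) : Int)) = ((ρ : Int) + 1) by push_cast; ring,
        show (((ν + 1 : Nat) : Int)) = ((ν : Int) + 1) by push_cast; ring,
        show ((ν : Int) + 1 - 1) = (ν : Int) by ring,
        show ((ρ : Int) + 1 - 1) = (ρ : Int) by ring,
        Int.toNat_natCast ν, pv_c1_eq ν ρ,
        show ((pool.length - (ν + 1) : Nat) : Int) = ((pool.length - 1 - ν : Nat) : Int) by omega]
    exact pv_inner_loop pool ρ
      (fun m index acc fb h1 h2 h3 h4 => ih m pool index acc fb h1 h2 h3 h4)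
      ν index acc fb (by omega) (by omega) h0 (by omega)

-- ===== VERDICT (by name: the statement is the Claim_ definition above) =====
theorem nth_combination_spec : Claim_equal_nth_combination := by
  intro iterable r index hdom hpre
  obtain ⟨hr0, hrle, hlo, hhi⟩ := hpre
  obtain ⟨ρ, rfl⟩ : ∃ ρ : Nat, r = (ρ : Int) := ⟨r.toNat, by omega⟩
  rw [Int.toNat_natCast ρ] at hlo hhi
  simp only [Spec_nth_combination, nth_combination, nth_combination_alt, PySem.List.len_eq]
  rw [if_neg (by omega : ¬((ρ : Int) < 0 ∨ (ρ : Int) > (iterable.length : Int))),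
      if_neg (by omega : ¬((ρ : Int) < 0 ∨ (ρ : Int) > (iterable.length : Int)))]
  have hcomb : pvComb (iterable.length : Int) (ρ : Int) = (iterable.length.choose ρ : Int) :=
    pv_comb_eq iterable.length ρ
  have hcombA : pvCombLoop (iterable.length : Int) (min (ρ : Int) ((iterable.length : Int) - ρ))
      = (iterable.length.choose ρ : Int) := by
    rw [show pvCombLoop (iterable.length : Int) (min (ρ : Int) ((iterable.length : Int) - ρ))
          = pvComb (iterable.length : Int) (ρ : Int) from by
        unfold pvComb; rw [if_neg (by omega)], hcomb]
  rw [hcombA, hcomb]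
  obtain ⟨h1, h2⟩ : 0 ≤ (if index < 0 then index + (iterable.length.choose ρ : Int) else index)
      ∧ (if index < 0 then index + (iterable.length.choose ρ : Int) else index)
        < (iterable.length.choose ρ : Int) := by
    split_ifs <;> omega
  have hcond : ¬((if index < 0 then index + (iterable.length.choose ρ : Int) else index) < 0
      ∨ (if index < 0 then index + (iterable.length.choose ρ : Int) else index)
        ≥ (iterable.length.choose ρ : Int)) := by omega
  rw [if_neg hcond, if_neg hcond, Int.toNat_natCast ρ]
  have hmain := pv_main_loop ρ iterable.length iterable
    (if index < 0 then index + (iterable.length.choose ρ : Int) else index) []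
    iterable.length le_rfl le_rfl h1 h2
  simpa using hmain
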